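-- pv_equiv track=rewrite | github.com/LT-Loo/RushHourGame | Assignment1.py | moveVehicle
-- ===== SOURCE A (Python) =====
-- def collectData(stateStr) :
--     vehicleData = {}
--     for x in stateStr :
--         if x not in vehicleData and x != '.':
--             vehicleData[x] = {}
--             start = stateStr.find(x)
--             end = stateStr.rfind(x)
--             vehicleType = end - start
--             if vehicleType >= 6:
--                 vehicleData[x]['Direction'] = 'Vertical'
--                 vehicleData[x]['coordY'] = start % 6
--                 if vehicleType // 6 == 2 :
--                     vehicleData[x]['Type'] = 3
--                     vehicleData[x]['coordX'] = [start // 6, (start+6) // 6, end // 6]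
--                     vehicleData[x]['Position'] = [start, start + 6, end]
--                 else :
--                     vehicleData[x]['Type'] = 2
--                     vehicleData[x]['coordX'] = [start // 6, end // 6]
--                     vehicleData[x]['Position'] = [start, end]
--             else :
--                 vehicleData[x]['Direction'] = 'Horizontal'
--                 vehicleData[x]['coordX'] = start // 6
--                 if vehicleType == 2 :
--                     vehicleData[x]['Type'] = 3
--                     vehicleData[x]['coordY'] = [start % 6, start % 6 + 1 , end % 6]
--                     vehicleData[x]['Position'] = [start, start + 1, end]
--                 else :
--                     vehicleData[x]['Type'] = 2
--                     vehicleData[x]['coordY'] = [start % 6, end % 6]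
--                     vehicleData[x]['Position'] = [start, end]
--
--     return vehicleData
--
-- def moveVehicle(parentState, parentStr, posAction) :
--     childrenState = []
--     childrenStr = []
--     childData = collectData(parentStr)
--     for action in posAction :
--         i = action[0]
--         childState = parentState.copy()
--         if action[1] == 'L' or action[1] == 'U' : # If vehicle moves upwards or to the left
--             if action[1] == 'L' : move = 1 # Left
--             else : move = 6 # Up
--             for n in range(childData[i]['Type']) :
--                 childState[childData[i]['Position'][n]] = '.'
--                 childState[childData[i]['Position'][n] - (move * int(action[2]))] = i
--         else: # If vehicle moves downwards or to the right
--             if action[1] == 'R' : move = 1 # Right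
--             else : move = 6 # Down
--             for n in range(childData[i]['Type'], 0, -1) :
--                 childState[childData[i]['Position'][n - 1]] = '.'
--                 childState[childData[i]['Position'][n - 1] + (move * int(action[2]))] = i
--         childStr = ""
--         for c in childState : childStr += str(c)
--         childrenState.append(childState)
--         childrenStr.append(childStr)
--
--     return childrenState, childrenStr
-- ===== SOURCE B (Python) =====
-- def moveVehicle(parentState, parentStr, posAction):
--     childrenState = []
--     childrenStr = []
--     for i, direction, amount in posAction:
--         first = parentStr.index(i)
--         last = parentStr.rindex(i)
--         span = last - first
--         step = 6 if span >= 6 else 1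
--         cells = [first, first + step, last] if span // step == 2 else [first, last]
--         shift = (1 if direction in ('L', 'R') else 6) * int(amount)
--         if direction in ('L', 'U'):
--             order, shift = cells, -shift
--         else:
--             order = list(reversed(cells))
--         child = parentState.copy()
--         for p in order:
--             child[p] = '.'
--             child[p + shift] = i
--         childrenState.append(child)
--         childrenStr.append(''.join(map(str, child)))
--     return childrenState, childrenStr
-- ===== Notes on version B (the rewrite author's own statement) =====
-- stated objective: simpler
-- what changed: B drops A's collectData precomputation stage entirely: no vehicle dict is built; each action lazily looks up its own vehicle via index/rindex, the four-branch Horizontal/Vertical x Type-2/3 cascade collapses into one arithmetic rule (step = 6 or 1, three cells iff span//step == 2), and A's two mirrored write loops become a single loop over an ordered cell list with a signed shift.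
import Mathlib
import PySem

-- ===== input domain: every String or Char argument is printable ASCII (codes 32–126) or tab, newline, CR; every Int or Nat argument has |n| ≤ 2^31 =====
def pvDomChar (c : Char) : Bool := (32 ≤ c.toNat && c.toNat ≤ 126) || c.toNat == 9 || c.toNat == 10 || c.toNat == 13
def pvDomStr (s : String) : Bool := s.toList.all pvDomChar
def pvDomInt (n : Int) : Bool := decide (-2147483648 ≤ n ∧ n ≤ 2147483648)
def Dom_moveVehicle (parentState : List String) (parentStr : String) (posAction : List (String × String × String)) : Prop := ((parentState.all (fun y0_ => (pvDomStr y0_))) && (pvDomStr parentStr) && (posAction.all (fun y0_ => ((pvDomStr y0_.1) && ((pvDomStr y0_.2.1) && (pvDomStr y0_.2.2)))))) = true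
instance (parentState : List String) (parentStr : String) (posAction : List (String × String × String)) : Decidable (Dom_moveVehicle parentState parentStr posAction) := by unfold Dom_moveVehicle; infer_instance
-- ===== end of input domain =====

-- B drops A's collectData precomputation (the per-vehicle Direction/Type/coords dict): each
-- action lazily looks up its own vehicle, one arithmetic rule replaces the four-branch
-- classification, and one signed-shift loop replaces the two mirrored write loops (simpler).

-- ===== PORT A =====
-- A's per-vehicle dict {'Direction','coordX','coordY','Type','Position'} as a record.
structure VData where
  direction : String
  typ : Int
  coordX : Sum Int (List Int)
  coordY : Sum Int (List Int)
  position : List Int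
deriving Repr, DecidableEq

-- the value A stores under vehicleData[x] (the branch cascade of collectData's loop body)
def entryA (stateStr : String) (x : Char) : VData :=
  let start := PySem.Str.find stateStr (String.singleton x)
  let stop := PySem.Str.rfind stateStr (String.singleton x)
  let vehicleType := stop - start
  if vehicleType ≥ 6 then
    if PySem.Int.floordiv vehicleType 6 = 2 then
      ⟨"Vertical", 3,
        Sum.inr [PySem.Int.floordiv start 6, PySem.Int.floordiv (start + 6) 6, PySem.Int.floordiv stop 6],
        Sum.inl (PySem.Int.mod start 6), [start, start + 6, stop]⟩
    else
      ⟨"Vertical", 2,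
        Sum.inr [PySem.Int.floordiv start 6, PySem.Int.floordiv stop 6],
        Sum.inl (PySem.Int.mod start 6), [start, stop]⟩
  else
    if vehicleType = 2 then
      ⟨"Horizontal", 3, Sum.inl (PySem.Int.floordiv start 6),
        Sum.inr [PySem.Int.mod start 6, PySem.Int.mod start 6 + 1, PySem.Int.mod stop 6],
        [start, start + 1, stop]⟩
    else
      ⟨"Horizontal", 2, Sum.inl (PySem.Int.floordiv start 6),
        Sum.inr [PySem.Int.mod start 6, PySem.Int.mod stop 6],
        [start, stop]⟩

def collectStep (stateStr : String) (vehicleData : PySem.Dict String VData) (x : Char) : PySem.Dict String VData :=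
  if vehicleData.contains (String.singleton x) = false ∧ x ≠ '.' then
    vehicleData.insert (String.singleton x) (entryA stateStr x)
  else vehicleData

def collectData (stateStr : String) : PySem.Dict String VData :=
  stateStr.toList.foldl (collectStep stateStr) PySem.Dict.empty

def moveVehicle (parentState : List String) (parentStr : String) (posAction : List (String × String × String)) : List (List String) × List String :=
  let childData := collectData parentStr
  posAction.foldl (fun (acc : List (List String) × List String) action =>
    let i := action.1
    -- childData[i] (KeyError outside Pre_; the default is never reached inside Pre_)
    let data := (childData.get? i).getD ⟨"", 0, Sum.inl 0, Sum.inl 0, []⟩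
    let childState :=
      if action.2.1 = "L" ∨ action.2.1 = "U" then
        let move : Int := if action.2.1 = "L" then 1 else 6
        (PySem.List.pyRange 0 data.typ).foldl (fun st n =>
          PySem.List.pySetD (PySem.List.pySetD st (PySem.List.pyGetD data.position n 0) ".")
            (PySem.List.pyGetD data.position n 0 - move * ((PySem.Int.ofStr? action.2.2).getD 0)) i) parentState
      else
        let move : Int := if action.2.1 = "R" then 1 else 6
        (PySem.List.pyRange data.typ 0 (-1)).foldl (fun st n =>
          PySem.List.pySetD (PySem.List.pySetD st (PySem.List.pyGetD data.position (n - 1) 0) ".")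
            (PySem.List.pyGetD data.position (n - 1) 0 + move * ((PySem.Int.ofStr? action.2.2).getD 0)) i) parentState
    let childStr := childState.foldl (fun s c => s ++ c) ""
    (acc.1 ++ [childState], acc.2 ++ [childStr])) ([], [])

-- ===== PORT B =====
def moveVehicle_alt (parentState : List String) (parentStr : String) (posAction : List (String × String × String)) : List (List String) × List String :=
  posAction.foldl (fun (acc : List (List String) × List String) a =>
    -- Source B: parentStr.index / .rindex (ValueError outside Pre_; inside Pre_ the vehicle is
    -- present, where index = find, so PySem.Str.find is exact there)
    let first := PySem.Str.find parentStr a.1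
    let last := PySem.Str.rfind parentStr a.1
    let span := last - first
    let step : Int := if span ≥ 6 then 6 else 1
    let cells := if PySem.Int.floordiv span step = 2 then [first, first + step, last] else [first, last]
    let shift := (if a.2.1 = "L" ∨ a.2.1 = "R" then 1 else 6) * ((PySem.Int.ofStr? a.2.2).getD 0)
    let ord := if a.2.1 = "L" ∨ a.2.1 = "U" then (cells, -shift) else (cells.reverse, shift)
    let child := ord.1.foldl (fun st p =>
      PySem.List.pySetD (PySem.List.pySetD st p ".") (p + ord.2) a.1) parentState
    (acc.1 ++ [child], acc.2 ++ [PySem.Str.join "" child])) ([], [])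

-- ===== PRECONDITION & SPEC =====
-- Pre_ is exactly where the Python A returns: each action names a single-character vehicle
-- present in parentStr (else KeyError), its amount parses as an int (else ValueError), and
-- every assigned index is in range of parentState (else IndexError).
def preActB (len : Nat) (l : List Char) (a : String × String × String) : Bool :=
  decide (a.1.toList.length = 1) &&
  (a.1.toList.all (fun c => decide (c ≠ '.') && decide (c ∈ l))) &&
  (PySem.Int.ofStr? a.2.2).isSome &&
  (let first := PySem.Chars.find l a.1.toList
   let last := PySem.Chars.rfind l a.1.toList
   let delta := (if a.2.1 = "L" ∨ a.2.1 = "R" then 1 else 6) * ((PySem.Int.ofStr? a.2.2).getD 0)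
   let shift := if a.2.1 = "L" ∨ a.2.1 = "U" then -delta else delta
   decide (last < (len : Int)) &&
   decide (PySem.Raise.InRange len (first + shift)) &&
   decide (PySem.Raise.InRange len (last + shift)))

def Pre_moveVehicle (parentState : List String) (parentStr : String) (posAction : List (String × String × String)) : Prop :=
  ∀ a ∈ posAction, preActB parentState.length parentStr.toList a = true

instance (parentState : List String) (parentStr : String) (posAction : List (String × String × String)) : Decidable (Pre_moveVehicle parentState parentStr posAction) := by
  unfold Pre_moveVehicle; infer_instance

def pvWitness_moveVehicle : List String × String × (List (String × String × String)) :=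
  (["A", "A", "."], "AA.", [("A", "R", "1")])

def Spec_moveVehicle (parentState : List String) (parentStr : String) (posAction : List (String × String × String)) (out : List (List String) × List String) : Prop := out = moveVehicle_alt parentState parentStr posAction
instance (parentState : List String) (parentStr : String) (posAction : List (String × String × String)) (out : List (List String) × List String) : Decidable (Spec_moveVehicle parentState parentStr posAction out) := by unfold Spec_moveVehicle; infer_instance

-- ===== CLAIM (what is proved, stated in full; the proofs are below) =====
def Claim_equal_moveVehicle : Prop := ∀ (parentState : List String) (parentStr : String) (posAction : List (String × String × String)), Dom_moveVehicle parentState parentStr posAction → Pre_moveVehicle parentState parentStr posAction → Spec_moveVehicle parentState parentStr posAction (moveVehicle parentState parentStr posAction)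

-- ===== LEMMAS AND PROOFS =====

lemma singleton_inj {c d : Char} (h : String.singleton c = String.singleton d) : c = d := by
  simpa using congrArg String.toList h

-- A's collectData loop: first insertion wins, value depends only on the full string
lemma collect_fold (str : String) (l : List Char) (d : PySem.Dict String VData) (c : Char) :
    (l.foldl (collectStep str) d).get? (String.singleton c) =
      if c ∈ l ∧ c ≠ '.' ∧ d.get? (String.singleton c) = none then some (entryA str c)
      else d.get? (String.singleton c) := by
  induction l generalizing d with
  | nil => simp
  | cons x t ih =>
    rw [List.foldl_cons, ih]
    by_cases hx : x = c
    · subst hx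
      by_cases hdot : x = '.'
      · have hd' : collectStep str d x = d := by
          simp [collectStep, hdot]
        rw [hd']
        simp [hdot]
      · by_cases hn : d.get? (String.singleton x) = none
        · have hd' : (collectStep str d x).get? (String.singleton x) = some (entryA str x) := by
            simp only [collectStep]
            rw [if_pos ⟨by rw [PySem.Dict.contains_eq_isSome_get?, hn]; rfl, hdot⟩]
            exact PySem.Dict.get?_insert_self _ _ _
          rw [hd']
          simp [hdot, hn]
        · have hd' : collectStep str d x = d := by
            simp only [collectStep]
            rw [if_neg]
            rintro ⟨h1, -⟩
            rw [PySem.Dict.contains_eq_isSome_get?] at h1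
            cases hg : d.get? (String.singleton x) with
            | none => exact hn hg
            | some w => rw [hg] at h1; simp at h1
          rw [hd']
          simp [hdot, hn]
    · have hd' : (collectStep str d x).get? (String.singleton c) = d.get? (String.singleton c) := by
        simp only [collectStep]
        split
        · exact PySem.Dict.get?_insert_of_ne _ _ (fun h => hx (singleton_inj h).symm)
        · rfl
      rw [hd']
      have hmem : (c ∈ x :: t) ↔ (c ∈ t) := by
        constructor
        · intro h
          rcases List.mem_cons.mp h with h | h
          · exact absurd h.symm hx
          · exact h
        · exact fun h => List.mem_cons_of_mem _ h
      simp only [hmem]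

-- the Position/Type fields of A's entry equal B's step-formula cell list and its length
lemma entryA_cells (str : String) (c : Char) :
    (entryA str c).position =
      (let first := PySem.Str.find str (String.singleton c)
       let last := PySem.Str.rfind str (String.singleton c)
       let span := last - first
       let step : Int := if span ≥ 6 then 6 else 1
       if PySem.Int.floordiv span step = 2 then [first, first + step, last] else [first, last]) ∧
    (entryA str c).typ =
      (((let first := PySem.Str.find str (String.singleton c)
         let last := PySem.Str.rfind str (String.singleton c)
         let span := last - first
         let step : Int := if span ≥ 6 then 6 else 1
         if PySem.Int.floordiv span step = 2 then [first, first + step, last] else [first, last]) : List Int).length : Int) := by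
  unfold entryA
  dsimp only
  have hone : ∀ z : Int, PySem.Int.floordiv z 1 = z := by
    intro z; simp [PySem.Int.floordiv]
  by_cases h6 : PySem.Str.rfind str (String.singleton c) - PySem.Str.find str (String.singleton c) ≥ 6
  · rw [if_pos h6, if_pos h6]
    split_ifs <;> simp
  · rw [if_neg h6, if_neg h6]
    rw [hone]
    split_ifs <;> simp

-- string building: A's '+='-loop equals B's ''.join
lemma join_cons (x : String) (l : List String) :
    PySem.Str.join "" (x :: l) = x ++ PySem.Str.join "" l := by
  apply String.toList_inj.mp
  rw [String.toList_append]
  simp only [PySem.Str.join, String.toList_ofList, List.map_cons]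
  cases l with
  | nil => simp [PySem.Chars.join_singleton, PySem.Chars.join_nil]
  | cons y t => rw [List.map_cons, PySem.Chars.join_cons_cons]; simp

lemma foldl_append_join (l : List String) : ∀ s : String, l.foldl (fun a c => a ++ c) s = s ++ PySem.Str.join "" l := by
  induction l with
  | nil =>
    intro s
    apply String.toList_inj.mp
    simp [PySem.Str.join, PySem.Chars.join_nil]
  | cons x t ih =>
    intro s
    rw [List.foldl_cons, ih, join_cons, String.append_assoc]

lemma loopAsc {α : Type} (cs : List Int) (g : List α → Int → List α) (ps : List α) :
    (PySem.List.pyRange 0 (cs.length : Int)).foldl (fun st n => g st (PySem.List.pyGetD cs n 0)) ps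
      = cs.foldl g ps := by
  simpa using PySem.List.foldl_pyRange_pyGetD cs 0 g ps (a := 0) le_rfl

lemma pyRange_desc (m : Nat) :
    PySem.List.pyRange (m : Int) 0 (-1) = (List.range m).map (fun j => ((m - j : Nat) : Int)) := by
  unfold PySem.List.pyRange
  rw [if_neg (by norm_num)]
  dsimp only
  rw [if_neg (by norm_num)]
  by_cases hm : 0 < m
  · rw [if_pos (by exact_mod_cast hm)]
    have hcnt : (((m : Int) - 0 + -(-1) - 1) / -(-1)).toNat = m := by norm_num
    rw [hcnt]
    apply List.map_congr_left
    intro k hk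
    have : k < m := List.mem_range.mp hk
    omega
  · have hz : m = 0 := by omega
    subst hz
    norm_num

lemma loopDesc {α : Type} (cs : List Int) (g : List α → Int → List α) (ps : List α) :
    (PySem.List.pyRange (cs.length : Int) 0 (-1)).foldl (fun st n => g st (PySem.List.pyGetD cs (n - 1) 0)) ps
      = cs.reverse.foldl g ps := by
  have hrev : cs.reverse = (List.range cs.length).map (fun j => cs.getD (cs.length - 1 - j) 0) := by
    apply List.ext_getElem
    · simp
    · intro j h1 h2
      have hj : j < cs.length := by simpa using h1
      rw [List.getElem_reverse]
      rw [List.getElem_map, List.getElem_range]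
      rw [List.getD_eq_getElem cs 0 (by omega)]
  rw [pyRange_desc, List.foldl_map, hrev, List.foldl_map]
  apply PySem.List.foldl_congr_mem
  intro acc j hj
  have hjm : j < cs.length := List.mem_range.mp hj
  have hidx : ((cs.length - j : Nat) : Int) - 1 = ((cs.length - 1 - j : Nat) : Int) := by omega
  rw [hidx, PySem.List.pyGetD_natCast]

-- per-action: A's range(Type)-indexed loops over Position equal B's single signed-shift loop
lemma childEq (dir amtS i : String) (cs : List Int) (ps : List String) :
    (if dir = "L" ∨ dir = "U" then
      (PySem.List.pyRange 0 (cs.length : Int)).foldl (fun st n =>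
        PySem.List.pySetD (PySem.List.pySetD st (PySem.List.pyGetD cs n 0) ".")
          (PySem.List.pyGetD cs n 0 - (if dir = "L" then 1 else 6) * ((PySem.Int.ofStr? amtS).getD 0)) i) ps
    else
      (PySem.List.pyRange (cs.length : Int) 0 (-1)).foldl (fun st n =>
        PySem.List.pySetD (PySem.List.pySetD st (PySem.List.pyGetD cs (n - 1) 0) ".")
          (PySem.List.pyGetD cs (n - 1) 0 + (if dir = "R" then 1 else 6) * ((PySem.Int.ofStr? amtS).getD 0)) i) ps)
    = ((if dir = "L" ∨ dir = "U" then
          (cs, -((if dir = "L" ∨ dir = "R" then 1 else 6) * ((PySem.Int.ofStr? amtS).getD 0)))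
        else
          (cs.reverse, (if dir = "L" ∨ dir = "R" then 1 else 6) * ((PySem.Int.ofStr? amtS).getD 0))).1.foldl
        (fun st p => PySem.List.pySetD (PySem.List.pySetD st p ".")
          (p + (if dir = "L" ∨ dir = "U" then
                  (cs, -((if dir = "L" ∨ dir = "R" then 1 else 6) * ((PySem.Int.ofStr? amtS).getD 0)))
                else
                  (cs.reverse, (if dir = "L" ∨ dir = "R" then 1 else 6) * ((PySem.Int.ofStr? amtS).getD 0))).2) i) ps) := by
  by_cases hLU : dir = "L" ∨ dir = "U"
  · rw [if_pos hLU]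
    simp only [if_pos hLU]
    have hmv : (if dir = "L" then (1:Int) else 6) = if dir = "L" ∨ dir = "R" then (1:Int) else 6 := by
      by_cases hL : dir = "L"
      · simp [hL]
      · rcases hLU with h | h
        · exact absurd h hL
        · simp [h]
    rw [hmv]
    have hsub : ∀ p d : Int, p - d = p + -d := by intro p d; ring
    rw [show (fun (st : List String) n =>
        PySem.List.pySetD (PySem.List.pySetD st (PySem.List.pyGetD cs n 0) ".")
          (PySem.List.pyGetD cs n 0 - (if dir = "L" ∨ dir = "R" then (1:Int) else 6) * ((PySem.Int.ofStr? amtS).getD 0)) i)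
      = (fun (st : List String) n =>
        PySem.List.pySetD (PySem.List.pySetD st (PySem.List.pyGetD cs n 0) ".")
          (PySem.List.pyGetD cs n 0 + -((if dir = "L" ∨ dir = "R" then (1:Int) else 6) * ((PySem.Int.ofStr? amtS).getD 0))) i)
      from by funext st n; rw [hsub]]
    exact loopAsc cs (fun st p => PySem.List.pySetD (PySem.List.pySetD st p ".")
      (p + -((if dir = "L" ∨ dir = "R" then 1 else 6) * ((PySem.Int.ofStr? amtS).getD 0))) i) ps
  · rw [if_neg hLU]
    simp only [if_neg hLU]
    have hmv : (if dir = "R" then (1:Int) else 6) = if dir = "L" ∨ dir = "R" then (1:Int) else 6 := by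
      by_cases hR : dir = "R"
      · simp [hR]
      · have hL : ¬ dir = "L" := fun h => hLU (Or.inl h)
        simp [hL, hR]
    rw [hmv]
    exact loopDesc cs (fun st p => PySem.List.pySetD (PySem.List.pySetD st p ".")
      (p + (if dir = "L" ∨ dir = "R" then 1 else 6) * ((PySem.Int.ofStr? amtS).getD 0)) i) ps

-- ===== VERDICT =====
theorem moveVehicle_spec : Claim_equal_moveVehicle := by
  intro parentState parentStr posAction _ hpre
  unfold Spec_moveVehicle moveVehicle moveVehicle_alt
  apply PySem.List.foldl_congr_mem
  intro acc a ha
  dsimp only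
  have hp := hpre a ha
  simp only [preActB, Bool.and_eq_true, decide_eq_true_eq, List.all_eq_true] at hp
  obtain ⟨⟨⟨hlen, hch⟩, -⟩, -⟩ := hp
  obtain ⟨c, hc⟩ := List.length_eq_one_iff.mp hlen
  have hsing : a.1 = String.singleton c := by
    apply String.toList_inj.mp
    simp [hc]
  obtain ⟨hdot, hmem⟩ := hch c (by simp [hc])
  have hA : (collectData parentStr).get? a.1 = some (entryA parentStr c) := by
    rw [hsing]
    unfold collectData
    rw [collect_fold]
    simp [hmem, hdot]
  rw [hA]
  simp only [Option.getD_some]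
  obtain ⟨hpos, htyp⟩ := entryA_cells parentStr c
  rw [hpos, htyp, ← hsing] at *
  rw [childEq a.2.1 a.2.2 a.1 _ parentState]
  rw [foldl_append_join, String.empty_append]
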